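/- GENERATED by farm/mkstatement.py from design/units.tsv (unit `GifBitSize`) and the Specs of Gif/Spec/*.lean — do not edit.
   THE STATEMENT of the proof unit `GifBitSize`: the function `GifBitSize` (11 instructions) satisfies its contract,
   given the contracts of its callees. What the names mean: ProgX/Base/Spec/Basic.lean. The theorem to prove:
   `theorem GifBitSize_ok : Gif.Spec.GifBitSize.Statement`. -/
import Gif.Code
import Gif.Dec.All
import Gif.Labels
import Gif.Spec.Alloc
namespace Gif.Spec.GifBitSize
open X86 X86.User Asan

/-- The statement of unit `GifBitSize`. -/
def Statement : Prop :=
  ∀ (Lay : Layout) (_hLay : Lay.hi = 0x1000000) (μ : Microarch) (_hμ : UserX.MicroOK μ) (u₀ : State)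
    (_hcode : HasCodeNat Lay u₀ Gif.L.GifBitSize.entry Gif.Code.code_GifBitSize.nat Gif.L.GifBitSize.size),
    Calls Lay μ ProgX.Base.WayInv (ProgX.Base.conv u₀) Gif.L.GifBitSize.entry Gif.Spec.GifBitSize.spec

end Gif.Spec.GifBitSize
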